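-- pv_equiv track=rewrite | github.com/bvhungit-crypto/ai-video-pipeline-TextToPrompt | core/self_critic_engine.py | _has_duplicate_lines
-- ===== SOURCE A (Python) =====
-- def _has_duplicate_lines(lines: list[str]) -> bool:
--     seen: set[str] = set()
--     for line in lines:
--         key = line.lower()
--         if key in seen:
--             return True
--         seen.add(key)
--     return False
-- ===== SOURCE B (Python) =====
-- def _has_duplicate_lines(lines: list[str]) -> bool:
--     items = sorted(line.lower() for line in lines)
--     return any(a == b for a, b in zip(items, items[1:]))
-- ===== Notes on version B (the rewrite author's own statement) =====
-- stated objective: alternative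
-- what changed: Replaces the hash-set membership loop with sort-then-scan: lower-case all lines, sort them, and report a duplicate iff some adjacent pair is equal.
import Mathlib
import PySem

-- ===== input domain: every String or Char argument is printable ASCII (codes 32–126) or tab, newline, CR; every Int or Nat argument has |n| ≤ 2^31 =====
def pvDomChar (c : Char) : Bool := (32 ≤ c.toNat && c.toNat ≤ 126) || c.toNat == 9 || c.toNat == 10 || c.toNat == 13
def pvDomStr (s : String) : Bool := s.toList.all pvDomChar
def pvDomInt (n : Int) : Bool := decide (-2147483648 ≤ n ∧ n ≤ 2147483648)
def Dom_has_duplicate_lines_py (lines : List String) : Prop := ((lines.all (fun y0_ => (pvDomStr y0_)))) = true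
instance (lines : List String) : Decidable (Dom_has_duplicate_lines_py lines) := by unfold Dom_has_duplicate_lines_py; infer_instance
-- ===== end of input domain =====

-- B replaces A's hash-set membership loop by sort-then-adjacent-scan (alternative algorithm, same results).

-- ===== PORT A =====
-- the for-loop of A: early-return true on a seen key, otherwise extend the set
def pvALoop (seen : PySem.Set String) : List String → Bool
  | [] => false
  | line :: rest =>
      let key := PySem.Str.lower line
      if PySem.Set.contains seen key then true
      else pvALoop (PySem.Set.add seen key) rest

def has_duplicate_lines_py (lines : List String) : Bool :=
  pvALoop PySem.Set.empty lines

-- ===== PORT B =====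
-- any(a == b for a, b in zip(items, items[1:]))
def pvAdjEq : List String → Bool
  | a :: b :: rest => if a == b then true else pvAdjEq (b :: rest)
  | _ => false

def has_duplicate_lines_py_alt (lines : List String) : Bool :=
  pvAdjEq (PySem.List.sorted (lines.map (fun line => PySem.Str.lower line)) (fun x => x) false)

-- ===== PRECONDITION & SPEC =====
def Spec_has_duplicate_lines_py (lines : List String) (out : Bool) : Prop := out = has_duplicate_lines_py_alt lines
instance (lines : List String) (out : Bool) : Decidable (Spec_has_duplicate_lines_py lines out) := by unfold Spec_has_duplicate_lines_py; infer_instance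

-- ===== CLAIM (what is proved, stated in full; the proofs are below) =====
def Claim_equal_has_duplicate_lines_py : Prop := ∀ (lines : List String), Dom_has_duplicate_lines_py lines → Spec_has_duplicate_lines_py lines (has_duplicate_lines_py lines)

-- ===== LEMMAS AND PROOFS =====

-- A's loop is true iff some key is already in `seen` or the key list itself repeats
theorem pvALoop_eq_true_iff (xs : List String) (seen : PySem.Set String) :
    pvALoop seen xs = true ↔
      (∃ k ∈ xs.map (fun l => PySem.Str.lower l), k ∈ seen) ∨
        ¬ (xs.map (fun l => PySem.Str.lower l)).Nodup := by
  induction xs generalizing seen with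
  | nil => simp [pvALoop]
  | cons x rest ih =>
      simp only [pvALoop, List.map_cons]
      by_cases h : PySem.Set.contains seen (PySem.Str.lower x) = true
      · rw [PySem.Set.contains_iff] at h
        simp [h]
      · rw [if_neg h, ih]
        rw [PySem.Set.contains_iff] at h
        rw [List.nodup_cons]
        constructor
        · rintro (⟨k, hk, hmem⟩ | hnd)
          · rw [PySem.Set.mem_add] at hmem
            rcases hmem with hs | rfl
            · exact Or.inl ⟨k, List.mem_cons_of_mem _ hk, hs⟩
            · exact Or.inr (fun ⟨hnin, _⟩ => hnin hk)
          · exact Or.inr (fun ⟨_, hnd'⟩ => hnd hnd')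
        · rintro (⟨k, hk, hmem⟩ | hnd)
          · rcases List.mem_cons.mp hk with rfl | hk
            · exact absurd hmem h
            · exact Or.inl ⟨k, hk, by rw [PySem.Set.mem_add]; exact Or.inl hmem⟩
          · by_cases hin : PySem.Str.lower x ∈ rest.map (fun l => PySem.Str.lower l)
            · exact Or.inl ⟨_, hin, by rw [PySem.Set.mem_add]; exact Or.inr rfl⟩
            · exact Or.inr (fun hnd' => hnd ⟨hin, hnd'⟩)

-- the adjacent-equality scan on a ≤-sorted list is true iff the list repeats
theorem pvAdjEq_eq_true_iff (ys : List String) (hs : ys.Pairwise (· ≤ ·)) :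
    pvAdjEq ys = true ↔ ¬ ys.Nodup := by
  induction ys with
  | nil => simp [pvAdjEq]
  | cons a t ih =>
      cases t with
      | nil => simp [pvAdjEq]
      | cons b r =>
          rcases List.pairwise_cons.mp hs with ⟨hab_all, ht⟩
          by_cases hab : a = b
          · subst hab
            simp [pvAdjEq]
          · have : (a == b) = false := by simp [hab]
            rw [show pvAdjEq (a :: b :: r) = pvAdjEq (b :: r) by
              simp [pvAdjEq, this]]
            rw [ih ht]
            have hanot : a ∉ b :: r := by
              intro hmem
              have hle : a ≤ b := hab_all b (by simp)
              -- a appears in b :: r, all of whose elements are ≥ b ≥ … ; derive a = some element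
              rcases List.mem_cons.mp hmem with rfl | hmem
              · exact hab rfl
              · rcases List.pairwise_cons.mp ht with ⟨hb_all, _⟩
                have hba : b ≤ a := hb_all a hmem
                have hle2 : a ≤ b := hab_all b (by simp)
                exact hab (le_antisymm hle2 hba)
            simp [List.nodup_cons, hanot]

theorem has_duplicate_lines_py_eq (lines : List String) :
    has_duplicate_lines_py lines = has_duplicate_lines_py_alt lines := by
  unfold has_duplicate_lines_py has_duplicate_lines_py_alt
  have hperm : (PySem.List.sorted (lines.map (fun l => PySem.Str.lower l)) (fun x => x) false).Perm
      (lines.map (fun l => PySem.Str.lower l)) := PySem.List.sorted_perm _ _ _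
  have hpw : (PySem.List.sorted (lines.map (fun l => PySem.Str.lower l)) (fun x => x) false).Pairwise
      (fun x y => x ≤ y) := PySem.List.sorted_pairwise _ _
  rw [Bool.eq_iff_iff, pvALoop_eq_true_iff, pvAdjEq_eq_true_iff _ hpw, hperm.nodup_iff]
  simp [PySem.Set.empty]

-- ===== VERDICT (by name: the statement is the Claim_ definition above) =====
theorem has_duplicate_lines_py_spec : Claim_equal_has_duplicate_lines_py := by
  intro lines _
  exact has_duplicate_lines_py_eq lines
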